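-- pv_equiv track=rewrite | github.com/gooseman396/ECUFlash-MCP | evo_tuner_mcp.py | _detect_log_columns
-- ===== SOURCE A (Python) =====
-- from typing import Iterable
--
-- def _detect_log_columns(fields: list[str] | None) -> dict[str, str | None]:
--     if not fields:
--         return {}
--     def find_exact(name: str) -> str | None:
--         return name if name in fields else None
--
--     def find_contains(parts: Iterable[str]) -> str | None:
--         for field in fields:
--             if not field:
--                 continue
--             field_lower = field.lower()
--             if any(part in field_lower for part in parts):
--                 return field
--         return None
--
--     return {
--         "time": find_exact("LogEntrySeconds") or find_contains(["time", "seconds"]),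
--         "rpm": find_exact("RPM") or find_contains(["rpm"]),
--         "tps": find_exact("TPS") or find_contains(["tps", "throttle"]),
--         "speed": find_exact("Speed") or find_contains(["speed", "vehicle"]),
--         "boost": find_exact("Boost") or find_contains(["boost", "map"]),
--         "target_boost": find_contains(["target boost", "boost target", "boosttar"]),
--         "wgdc": find_contains(["wgdc", "wastegate", "wg duty", "duty"]),
--         "gear": find_contains(["gear"]),
--         "iat": find_contains(["iat", "intake temp", "iatf", "mat"]),
--         "afr": find_exact("AFR") or find_contains(["afr", "wideband"]),
--         "stft": find_contains(["stft", "short term"]),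
--         "ltft": find_contains(["ltft", "long term"]),
--         "fuel_pressure": find_contains(["fuel pressure", "fp"]),
--         "timing": find_exact("TimingAdv") or find_contains(["timing", "spark"]),
--         "knock": find_exact("KnockSum") or find_contains(["knock"]),
--         "baro": find_contains(["baro", "barometric"]),
--         "egt": find_contains(["egt", "exhaust gas"]),
--         "ipw": find_exact("IPW") or find_contains(["ipw", "pulse"]),
--         "idc": find_exact("IDC") or find_contains(["idc"]),
--         "load": find_exact("Load") or find_contains(["load"]),
--     }
-- ===== SOURCE B (Python) =====
-- _PARTS = [
--     ("time", ["time", "seconds"]),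
--     ("rpm", ["rpm"]),
--     ("tps", ["tps", "throttle"]),
--     ("speed", ["speed", "vehicle"]),
--     ("boost", ["boost", "map"]),
--     ("target_boost", ["target boost", "boost target", "boosttar"]),
--     ("wgdc", ["wgdc", "wastegate", "wg duty", "duty"]),
--     ("gear", ["gear"]),
--     ("iat", ["iat", "intake temp", "iatf", "mat"]),
--     ("afr", ["afr", "wideband"]),
--     ("stft", ["stft", "short term"]),
--     ("ltft", ["ltft", "long term"]),
--     ("fuel_pressure", ["fuel pressure", "fp"]),
--     ("timing", ["timing", "spark"]),
--     ("knock", ["knock"]),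
--     ("baro", ["baro", "barometric"]),
--     ("egt", ["egt", "exhaust gas"]),
--     ("ipw", ["ipw", "pulse"]),
--     ("idc", ["idc"]),
--     ("load", ["load"]),
-- ]
--
-- _EXACT = [
--     ("LogEntrySeconds", "time"),
--     ("RPM", "rpm"),
--     ("TPS", "tps"),
--     ("Speed", "speed"),
--     ("Boost", "boost"),
--     ("AFR", "afr"),
--     ("TimingAdv", "timing"),
--     ("KnockSum", "knock"),
--     ("IPW", "ipw"),
--     ("IDC", "idc"),
--     ("Load", "load"),
-- ]
--
--
-- def _detect_log_columns(fields):
--     if not fields: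
--         return {}
--     # Field-major pass: walk the log fields once, assigning each still-open
--     # role its first substring match.
--     found = {}
--     for f in fields:
--         if not f:
--             continue
--         fl = f.lower()
--         for role, parts in _PARTS:
--             if role not in found and any(p in fl for p in parts):
--                 found[role] = f
--     # Exact-name overrides take precedence over substring matches.
--     for name, role in _EXACT:
--         if name in fields:
--             found[role] = name
--     return {role: found.get(role) for role, _ in _PARTS}
-- ===== Notes on version B (the rewrite author's own statement) =====
-- stated objective: alternative
-- what changed: Inverts the traversal: instead of A's 20 per-role scans over the field list, B walks the fields once assigning each still-open role its first substring match into a dict, then applies exact-name overrides in a second pass and reads the dict out in role order.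
import Mathlib
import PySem

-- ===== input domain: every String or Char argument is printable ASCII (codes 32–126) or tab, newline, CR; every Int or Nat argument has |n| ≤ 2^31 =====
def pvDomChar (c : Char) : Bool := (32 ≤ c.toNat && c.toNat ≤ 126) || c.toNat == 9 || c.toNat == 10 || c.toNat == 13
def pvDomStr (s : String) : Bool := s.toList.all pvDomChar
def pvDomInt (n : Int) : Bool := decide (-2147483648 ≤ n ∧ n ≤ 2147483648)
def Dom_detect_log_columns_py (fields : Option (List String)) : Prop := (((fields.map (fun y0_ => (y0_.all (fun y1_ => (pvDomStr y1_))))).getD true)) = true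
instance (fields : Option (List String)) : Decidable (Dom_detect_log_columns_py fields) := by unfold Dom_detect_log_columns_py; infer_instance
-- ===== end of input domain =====

-- B inverts the traversal: instead of A's per-role scans over the fields, it walks the fields
-- ONCE assigning each still-open role its first substring match, then applies exact-name
-- overrides in a second small pass; same return value (objective: alternative).

-- ===== PORT A =====
-- find_exact(name): name if name in fields else None
def pvFindExact (fields : List String) (name : String) : Option String :=
  if name ∈ fields then some name else none

-- find_contains(parts): first non-empty field whose lowercase contains some part
def pvFindContains (fields parts : List String) : Option String :=
  match fields with
  | [] => none
  | f :: rest =>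
    if f = "" then pvFindContains rest parts
    else if parts.any (fun p => PySem.Str.isIn p (PySem.Str.lower f)) then some f
    else pvFindContains rest parts

-- Python 'x or y': x is find_exact's result, none or a non-empty literal name,
-- so 'some v' is truthy and 'none' falsy — the match is exact.
def pvOrElse (x y : Option String) : Option String :=
  match x with
  | some v => some v
  | none => y

def detect_log_columns_py (fields : Option (List String)) : List (String × Option String) :=
  match fields with
  | none => []
  | some fs =>
    if fs = [] then []            -- 'if not fields' on a list: empty is falsy
    else
      [ ("time", pvOrElse (pvFindExact fs "LogEntrySeconds") (pvFindContains fs ["time", "seconds"])),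
        ("rpm", pvOrElse (pvFindExact fs "RPM") (pvFindContains fs ["rpm"])),
        ("tps", pvOrElse (pvFindExact fs "TPS") (pvFindContains fs ["tps", "throttle"])),
        ("speed", pvOrElse (pvFindExact fs "Speed") (pvFindContains fs ["speed", "vehicle"])),
        ("boost", pvOrElse (pvFindExact fs "Boost") (pvFindContains fs ["boost", "map"])),
        ("target_boost", pvFindContains fs ["target boost", "boost target", "boosttar"]),
        ("wgdc", pvFindContains fs ["wgdc", "wastegate", "wg duty", "duty"]),
        ("gear", pvFindContains fs ["gear"]),
        ("iat", pvFindContains fs ["iat", "intake temp", "iatf", "mat"]),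
        ("afr", pvOrElse (pvFindExact fs "AFR") (pvFindContains fs ["afr", "wideband"])),
        ("stft", pvFindContains fs ["stft", "short term"]),
        ("ltft", pvFindContains fs ["ltft", "long term"]),
        ("fuel_pressure", pvFindContains fs ["fuel pressure", "fp"]),
        ("timing", pvOrElse (pvFindExact fs "TimingAdv") (pvFindContains fs ["timing", "spark"])),
        ("knock", pvOrElse (pvFindExact fs "KnockSum") (pvFindContains fs ["knock"])),
        ("baro", pvFindContains fs ["baro", "barometric"]),
        ("egt", pvFindContains fs ["egt", "exhaust gas"]),
        ("ipw", pvOrElse (pvFindExact fs "IPW") (pvFindContains fs ["ipw", "pulse"])),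
        ("idc", pvOrElse (pvFindExact fs "IDC") (pvFindContains fs ["idc"])),
        ("load", pvOrElse (pvFindExact fs "Load") (pvFindContains fs ["load"])) ]

-- ===== PORT B =====
-- _PARTS: (role, substring parts), in output order
def pvPartsTable : List (String × List String) :=
  [ ("time", ["time", "seconds"]),
    ("rpm", ["rpm"]),
    ("tps", ["tps", "throttle"]),
    ("speed", ["speed", "vehicle"]),
    ("boost", ["boost", "map"]),
    ("target_boost", ["target boost", "boost target", "boosttar"]),
    ("wgdc", ["wgdc", "wastegate", "wg duty", "duty"]),
    ("gear", ["gear"]),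
    ("iat", ["iat", "intake temp", "iatf", "mat"]),
    ("afr", ["afr", "wideband"]),
    ("stft", ["stft", "short term"]),
    ("ltft", ["ltft", "long term"]),
    ("fuel_pressure", ["fuel pressure", "fp"]),
    ("timing", ["timing", "spark"]),
    ("knock", ["knock"]),
    ("baro", ["baro", "barometric"]),
    ("egt", ["egt", "exhaust gas"]),
    ("ipw", ["ipw", "pulse"]),
    ("idc", ["idc"]),
    ("load", ["load"]) ]

-- _EXACT: (exact field name, role)
def pvExactTable : List (String × String) :=
  [ ("LogEntrySeconds", "time"),
    ("RPM", "rpm"),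
    ("TPS", "tps"),
    ("Speed", "speed"),
    ("Boost", "boost"),
    ("AFR", "afr"),
    ("TimingAdv", "timing"),
    ("KnockSum", "knock"),
    ("IPW", "ipw"),
    ("IDC", "idc"),
    ("Load", "load") ]

-- inner loop of the field pass: 'for role, parts in _PARTS: if role not in found and any(...): found[role] = f'
def pvInnerFold (tbl : List (String × List String)) (fl f : String)
    (d : PySem.Dict String String) : PySem.Dict String String :=
  tbl.foldl (fun d rp =>
    if (!d.contains rp.1) && rp.2.any (fun p => PySem.Str.isIn p fl) then d.insert rp.1 f else d) d

-- body of 'for f in fields': skip empty, fl = f.lower(), run the inner loop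
def pvFieldStep (d : PySem.Dict String String) (f : String) : PySem.Dict String String :=
  if f = "" then d else pvInnerFold pvPartsTable (PySem.Str.lower f) f d

def pvFieldPass (fs : List String) : PySem.Dict String String :=
  fs.foldl pvFieldStep PySem.Dict.empty

-- 'for name, role in _EXACT: if name in fields: found[role] = name'
def pvExactFold (tbl : List (String × String)) (fs : List String)
    (d : PySem.Dict String String) : PySem.Dict String String :=
  tbl.foldl (fun d nr => if nr.1 ∈ fs then d.insert nr.2 nr.1 else d) d

def detect_log_columns_py_alt (fields : Option (List String)) : List (String × Option String) :=
  match fields with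
  | none => []
  | some fs =>
    if fs = [] then []
    else
      let found := pvExactFold pvExactTable fs (pvFieldPass fs)
      -- '{role: found.get(role) for role, _ in _PARTS}': fresh dict over distinct roles
      pvPartsTable.map (fun rp => (rp.1, found.get? rp.1))

-- ===== PRECONDITION & SPEC =====
def Spec_detect_log_columns_py (fields : Option (List String)) (out : List (String × Option String)) : Prop := out = detect_log_columns_py_alt fields
instance (fields : Option (List String)) (out : List (String × Option String)) : Decidable (Spec_detect_log_columns_py fields out) := by unfold Spec_detect_log_columns_py; infer_instance

-- ===== CLAIM (what is proved, stated in full; the proofs are below) =====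
def Claim_equal_detect_log_columns_py : Prop := ∀ (fields : Option (List String)), Dom_detect_log_columns_py fields → Spec_detect_log_columns_py fields (detect_log_columns_py fields)

-- ===== LEMMAS AND PROOFS =====

-- roles not in the table are untouched by the inner loop
theorem pvInnerFold_get_not_mem (tbl : List (String × List String)) (fl f : String)
    (d : PySem.Dict String String) (role : String) (h : role ∉ tbl.map Prod.fst) :
    (pvInnerFold tbl fl f d).get? role = d.get? role := by
  induction tbl generalizing d with
  | nil => rfl
  | cons rp rest ih =>
    simp only [List.map_cons, List.mem_cons, not_or] at h
    simp only [pvInnerFold, List.foldl_cons]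
    rw [show (rest.foldl _ _) = pvInnerFold rest fl f _ from rfl, ih _ h.2]
    split
    · exact PySem.Dict.get?_insert_of_ne _ _ h.1
    · rfl

-- the inner loop's effect on a role that IS in the (fst-Nodup) table
theorem pvInnerFold_get_mem (tbl : List (String × List String)) (fl f : String)
    (d : PySem.Dict String String) (role : String) (ps : List String)
    (hnd : (tbl.map Prod.fst).Nodup) (hm : (role, ps) ∈ tbl) :
    (pvInnerFold tbl fl f d).get? role =
      if d.get? role = none ∧ ps.any (fun p => PySem.Str.isIn p fl) = true then some f
      else d.get? role := by
  induction tbl generalizing d with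
  | nil => cases hm
  | cons rp rest ih =>
    simp only [List.map_cons, List.nodup_cons] at hnd
    simp only [pvInnerFold, List.foldl_cons]
    rcases List.mem_cons.1 hm with heq | hrest
    · -- this entry is (role, ps); later entries cannot touch role
      subst heq
      rw [show (rest.foldl _ _) = pvInnerFold rest fl f _ from rfl,
        pvInnerFold_get_not_mem _ _ _ _ _ hnd.1]
      rw [PySem.Dict.contains_eq_isSome_get?]
      cases hget : d.get? role with
      | none =>
        split_ifs with h1 h2 h3
        · simp [PySem.Dict.get?_insert_self]
        · exact absurd ⟨rfl, by simpa using h1⟩ h2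
        · exact absurd (by simpa using h3.2) h1
        · exact hget
      | some v => simpa using hget
    · -- head's role differs from ours; step preserves get? at role
      have hne : role ≠ rp.1 := by
        intro h; apply hnd.1; rw [← h]
        exact List.mem_map.2 ⟨(role, ps), hrest, rfl⟩
      have hstep : ∀ d' : PySem.Dict String String,
          ((if (!d'.contains rp.1) && rp.2.any (fun p => PySem.Str.isIn p fl)
            then d'.insert rp.1 f else d') : PySem.Dict String String).get? role = d'.get? role := by
        intro d'; split
        · exact PySem.Dict.get?_insert_of_ne _ _ hne
        · rfl
      rw [show (rest.foldl _ _) = pvInnerFold rest fl f _ from rfl, ih _ hnd.2 hrest, hstep]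

-- the whole field pass computes, per role, A's find_contains
theorem pvFieldLoop_get (fs : List String) (d : PySem.Dict String String)
    (role : String) (ps : List String) (hm : (role, ps) ∈ pvPartsTable) :
    (fs.foldl pvFieldStep d).get? role =
      match d.get? role with
      | some v => some v
      | none => pvFindContains fs ps := by
  induction fs generalizing d with
  | nil => cases h : d.get? role <;> simp [pvFindContains, h]
  | cons f rest ih =>
    have hnd : (pvPartsTable.map Prod.fst).Nodup := by decide
    simp only [List.foldl_cons]
    rw [ih]
    by_cases hf : f = ""
    · simp [pvFieldStep, hf, pvFindContains]
    · simp only [pvFieldStep, if_neg hf]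
      rw [pvInnerFold_get_mem _ _ _ _ _ _ hnd hm]
      cases hget : d.get? role with
      | some v => simp
      | none =>
        simp only [true_and]
        simp only [pvFindContains, if_neg hf]
        split_ifs with h1 <;> rfl

-- roles without an exact name are untouched by the override pass
theorem pvExactFold_get_not_mem (tbl : List (String × String)) (fs : List String)
    (d : PySem.Dict String String) (role : String) (h : role ∉ tbl.map Prod.snd) :
    (pvExactFold tbl fs d).get? role = d.get? role := by
  induction tbl generalizing d with
  | nil => rfl
  | cons nr rest ih =>
    simp only [List.map_cons, List.mem_cons, not_or] at h
    simp only [pvExactFold, List.foldl_cons]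
    rw [show (rest.foldl _ _) = pvExactFold rest fs _ from rfl, ih _ h.2]
    split
    · exact PySem.Dict.get?_insert_of_ne _ _ h.1
    · rfl

-- the override pass on a role with exact name 'name' in the (snd-Nodup) table
theorem pvExactFold_get_mem (tbl : List (String × String)) (fs : List String)
    (d : PySem.Dict String String) (name role : String)
    (hnd : (tbl.map Prod.snd).Nodup) (hm : (name, role) ∈ tbl) :
    (pvExactFold tbl fs d).get? role =
      if name ∈ fs then some name else d.get? role := by
  induction tbl generalizing d with
  | nil => cases hm
  | cons nr rest ih =>
    simp only [List.map_cons, List.nodup_cons] at hnd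
    simp only [pvExactFold, List.foldl_cons]
    rcases List.mem_cons.1 hm with heq | hrest
    · subst heq
      rw [show (rest.foldl _ _) = pvExactFold rest fs _ from rfl,
        pvExactFold_get_not_mem _ _ _ _ hnd.1]
      split
      · simp [PySem.Dict.get?_insert_self]
      · rfl
    · have hne : role ≠ nr.2 := by
        intro h; apply hnd.1; rw [← h]
        exact List.mem_map.2 ⟨(name, role), hrest, rfl⟩
      have hstep : ((if nr.1 ∈ fs then d.insert nr.2 nr.1 else d) : PySem.Dict String String).get? role
          = d.get? role := by
        split
        · exact PySem.Dict.get?_insert_of_ne _ _ hne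
        · rfl
      rw [show (rest.foldl _ _) = pvExactFold rest fs _ from rfl, ih _ hnd.2 hrest, hstep]

-- per-role value of B, role WITH an exact name: A's 'find_exact(name) or find_contains(ps)'
theorem pvKeyExact (fs : List String) (role name : String) (ps : List String)
    (h1 : (role, ps) ∈ pvPartsTable) (h2 : (name, role) ∈ pvExactTable) :
    (pvExactFold pvExactTable fs (pvFieldPass fs)).get? role
      = pvOrElse (pvFindExact fs name) (pvFindContains fs ps) := by
  rw [pvExactFold_get_mem _ _ _ _ _ (by decide) h2]
  unfold pvFieldPass
  rw [pvFieldLoop_get _ _ _ _ h1]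
  by_cases hmem : name ∈ fs <;>
    simp [hmem, pvFindExact, pvOrElse, PySem.Dict.get?_empty]

-- per-role value of B, role WITHOUT an exact name: A's 'find_contains(ps)'
theorem pvKeyPlain (fs : List String) (role : String) (ps : List String)
    (h1 : (role, ps) ∈ pvPartsTable) (h2 : role ∉ pvExactTable.map Prod.snd) :
    (pvExactFold pvExactTable fs (pvFieldPass fs)).get? role = pvFindContains fs ps := by
  rw [pvExactFold_get_not_mem _ _ _ _ h2]
  unfold pvFieldPass
  rw [pvFieldLoop_get _ _ _ _ h1]
  simp [PySem.Dict.get?_empty]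

-- ===== VERDICT (by name: the statement is the Claim_ definition above) =====
set_option maxHeartbeats 1000000 in
theorem detect_log_columns_py_spec : Claim_equal_detect_log_columns_py := by
  intro fields _
  cases fields with
  | none => rfl
  | some fs =>
    by_cases h : fs = []
    · simp [Spec_detect_log_columns_py, detect_log_columns_py, detect_log_columns_py_alt, h]
    · simp only [Spec_detect_log_columns_py, detect_log_columns_py,
        detect_log_columns_py_alt, if_neg h]
      show _ = pvPartsTable.map (fun rp => (rp.1, (pvExactFold pvExactTable fs (pvFieldPass fs)).get? rp.1))
      simp only [pvPartsTable, List.map_cons, List.map_nil]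
      rw [pvKeyExact fs "time" "LogEntrySeconds" ["time", "seconds"] (by decide) (by decide),
        pvKeyExact fs "rpm" "RPM" ["rpm"] (by decide) (by decide),
        pvKeyExact fs "tps" "TPS" ["tps", "throttle"] (by decide) (by decide),
        pvKeyExact fs "speed" "Speed" ["speed", "vehicle"] (by decide) (by decide),
        pvKeyExact fs "boost" "Boost" ["boost", "map"] (by decide) (by decide),
        pvKeyPlain fs "target_boost" ["target boost", "boost target", "boosttar"] (by decide) (by decide),
        pvKeyPlain fs "wgdc" ["wgdc", "wastegate", "wg duty", "duty"] (by decide) (by decide),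
        pvKeyPlain fs "gear" ["gear"] (by decide) (by decide),
        pvKeyPlain fs "iat" ["iat", "intake temp", "iatf", "mat"] (by decide) (by decide),
        pvKeyExact fs "afr" "AFR" ["afr", "wideband"] (by decide) (by decide),
        pvKeyPlain fs "stft" ["stft", "short term"] (by decide) (by decide),
        pvKeyPlain fs "ltft" ["ltft", "long term"] (by decide) (by decide),
        pvKeyPlain fs "fuel_pressure" ["fuel pressure", "fp"] (by decide) (by decide),
        pvKeyExact fs "timing" "TimingAdv" ["timing", "spark"] (by decide) (by decide),
        pvKeyExact fs "knock" "KnockSum" ["knock"] (by decide) (by decide),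
        pvKeyPlain fs "baro" ["baro", "barometric"] (by decide) (by decide),
        pvKeyPlain fs "egt" ["egt", "exhaust gas"] (by decide) (by decide),
        pvKeyExact fs "ipw" "IPW" ["ipw", "pulse"] (by decide) (by decide),
        pvKeyExact fs "idc" "IDC" ["idc"] (by decide) (by decide),
        pvKeyExact fs "load" "Load" ["load"] (by decide) (by decide)]
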